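-- pv_equiv track=rewrite | github.com/A0-42-org/agent-zero-skills | obsidian-note-creator/scripts/generate_tags.py | prioritize_tags
-- ===== SOURCE A (Python) =====
-- def prioritize_tags(tags: list, max_tags: int = 10) -> list:
--     """Prioritize tags based on importance and limit to max_tags."""
--     # Priority order - type tags first, then specific subjects
--     priority_order = [
--         'project', 'area', 'resource', 'archive',
--         'code', 'ai', 'business', 'health', 'family',
--         'task', 'todo', 'meeting', 'idea',
--         'python', 'javascript', 'typescript', 'svelte',
--         'nutrition', 'recette', 'cuisine',
--         'gaming', 'design', 'video', 'book'
--     ]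
--
--     # Sort tags by priority
--     prioritized = []
--     for tag in priority_order:
--         if tag in tags:
--             prioritized.append(tag)
--
--     # Add remaining tags not in priority list
--     for tag in tags:
--         if tag not in prioritized:
--             prioritized.append(tag)
--
--     return prioritized[:max_tags]
-- ===== SOURCE B (Python) =====
-- def prioritize_tags(tags: list, max_tags: int = 10) -> list:
--     """Bucket-sort re-implementation: rank table + one pass over the deduped tags."""
--     priority_order = [
--         'project', 'area', 'resource', 'archive',
--         'code', 'ai', 'business', 'health', 'family',
--         'task', 'todo', 'meeting', 'idea',
--         'python', 'javascript', 'typescript', 'svelte',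
--         'nutrition', 'recette', 'cuisine',
--         'gaming', 'design', 'video', 'book'
--     ]
--     n = len(priority_order)
--     rank = {t: i for i, t in enumerate(priority_order)}
--     buckets = [[] for _ in range(n + 1)]
--     for t in dict.fromkeys(tags):
--         buckets[rank.get(t, n)].append(t)
--     result = [t for bucket in buckets for t in bucket]
--     return result[:max_tags]
-- ===== Notes on version B (the rewrite author's own statement) =====
-- stated objective: faster
-- what changed: Replaces A's two membership-scanning passes (scan priority list testing 'tag in tags', then scan tags testing 'tag not in prioritized') with a rank dictionary plus a single bucket-sort pass over the deduplicated tags, flattened and truncated.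
import Mathlib
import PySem

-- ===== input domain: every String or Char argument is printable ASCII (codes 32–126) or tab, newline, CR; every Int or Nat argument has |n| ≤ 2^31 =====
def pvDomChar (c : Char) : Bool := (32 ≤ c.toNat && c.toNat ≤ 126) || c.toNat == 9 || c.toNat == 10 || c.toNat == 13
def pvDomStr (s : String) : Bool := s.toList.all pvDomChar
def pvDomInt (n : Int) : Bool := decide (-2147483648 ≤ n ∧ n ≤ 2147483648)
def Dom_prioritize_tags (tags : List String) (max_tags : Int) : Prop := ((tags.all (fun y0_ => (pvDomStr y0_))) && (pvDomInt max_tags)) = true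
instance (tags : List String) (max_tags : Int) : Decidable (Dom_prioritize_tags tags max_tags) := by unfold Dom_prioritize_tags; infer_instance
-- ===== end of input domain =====

-- B replaces A's two membership-scanning passes by a rank table + one bucket-sort pass over the deduped tags (objective: faster).

-- ===== PORT A =====
-- the literal priority_order list (shared constant data of both programs)
def pvPriority : List String :=
  ["project", "area", "resource", "archive",
   "code", "ai", "business", "health", "family",
   "task", "todo", "meeting", "idea",
   "python", "javascript", "typescript", "svelte",
   "nutrition", "recette", "cuisine",
   "gaming", "design", "video", "book"]

def prioritize_tags (tags : List String) (max_tags : Int) : List String :=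
  -- for tag in priority_order: if tag in tags: prioritized.append(tag)
  let prioritized := pvPriority.foldl (fun acc tag => if tag ∈ tags then acc ++ [tag] else acc) []
  -- for tag in tags: if tag not in prioritized: prioritized.append(tag)
  let prioritized := tags.foldl (fun acc tag => if tag ∉ acc then acc ++ [tag] else acc) prioritized
  PySem.List.slice prioritized none (some max_tags)   -- prioritized[:max_tags]

-- ===== PORT B =====
-- rank = {t: i for i, t in enumerate(priority_order)}
def pvRank : PySem.Dict String Int :=
  (PySem.List.enumerate pvPriority 0).foldl (fun d p => d.insert p.2 p.1) PySem.Dict.empty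

def prioritize_tags_alt (tags : List String) (max_tags : Int) : List String :=
  let n : Int := (pvPriority.length : Int)
  -- buckets = [[] for _ in range(n + 1)]
  let buckets : List (List String) := (PySem.List.pyRange 0 (n + 1) 1).map (fun _ => [])
  -- for t in dict.fromkeys(tags): buckets[rank.get(t, n)].append(t)
  -- (buckets[i].append(t) ported as read-modify-write with pyGetD/pySetD; the index
  --  rank.get(t, n) is always in range 0..n, where pyGetD/pySetD are exact)
  let buckets := (PySem.List.dedup tags).foldl
      (fun b t => PySem.List.pySetD b (pvRank.getD t n) (PySem.List.pyGetD b (pvRank.getD t n) [] ++ [t])) buckets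
  -- result = [t for bucket in buckets for t in bucket]
  let result := buckets.flatten
  PySem.List.slice result none (some max_tags)   -- result[:max_tags]

-- ===== PRECONDITION & SPEC =====
def Spec_prioritize_tags (tags : List String) (max_tags : Int) (out : List String) : Prop := out = prioritize_tags_alt tags max_tags
instance (tags : List String) (max_tags : Int) (out : List String) : Decidable (Spec_prioritize_tags tags max_tags out) := by unfold Spec_prioritize_tags; infer_instance

-- ===== CLAIM (what is proved, stated in full; the proofs are below) =====
def Claim_equal_prioritize_tags : Prop := ∀ (tags : List String) (max_tags : Int), Dom_prioritize_tags tags max_tags → Spec_prioritize_tags tags max_tags (prioritize_tags tags max_tags)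

-- ===== LEMMAS AND PROOFS =====

-- the bucket index B computes for a tag
def pvKey (t : String) : Nat := if t ∈ pvPriority then pvPriority.idxOf t else 24

theorem pvPriority_nodup : pvPriority.Nodup := by decide

theorem pvKey_lt (t : String) : pvKey t < 25 := by
  unfold pvKey
  split
  · have h := List.idxOf_lt_length_of_mem (by assumption : t ∈ pvPriority)
    have hlen : pvPriority.length = 24 := rfl
    omega
  · omega

theorem pvRank_getD (t : String) : pvRank.getD t ((pvPriority.length : Nat) : Int) = (pvKey t : Int) := by
  have hitems : pvRank.items
      = (PySem.List.enumerate pvPriority 0).map (fun p => (p.2, p.1)) := by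
    have := PySem.Dict.items_foldl_insert_fresh (l := PySem.List.enumerate pvPriority 0)
      (k := fun p => p.2) (v := fun p => p.1) (d := (PySem.Dict.empty : PySem.Dict String Int))
      (by intro a _; simp)
      (by rw [PySem.List.map_snd_enumerate]; exact pvPriority_nodup)
    simpa using this
  have hkeys : pvRank.keys = pvPriority := by
    show pvRank.items.map (·.1) = pvPriority
    rw [hitems, List.map_map]
    exact PySem.List.map_snd_enumerate pvPriority 0
  by_cases h : t ∈ pvPriority
  · have hj : pvPriority.idxOf t < pvPriority.length := List.idxOf_lt_length_of_mem h
    have hmem : ((0 + (pvPriority.idxOf t : Int)), pvPriority[pvPriority.idxOf t]) ∈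
        PySem.List.enumerate pvPriority 0 := by
      rw [PySem.List.mem_enumerate_iff]
      exact ⟨pvPriority.idxOf t, hj, rfl⟩
    have hmem' : (t, (pvPriority.idxOf t : Int)) ∈ pvRank.items := by
      rw [hitems]
      refine List.mem_map.mpr ⟨_, hmem, ?_⟩
      simp [List.getElem_idxOf hj]
    have hnk : pvRank.keys.Nodup := by rw [hkeys]; exact pvPriority_nodup
    rw [PySem.Dict.getD_of_mem_items pvRank hmem' hnk]
    simp [pvKey, h]
  · have hc : pvRank.contains t = false := by
      rw [PySem.Dict.contains_eq_decide_mem_keys, hkeys]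
      simp [h]
    rw [PySem.Dict.getD_of_not_contains pvRank _ hc]
    unfold pvKey
    rw [if_neg h]
    norm_num [pvPriority]

-- a list equals the range-indexed map of its entries
theorem pv_map_getD_range {α : Type} (x : α) : ∀ (l : List α),
    (List.range l.length).map (fun j => l.getD j x) = l := by
  intro l
  induction l with
  | nil => simp
  | cons a tl ih =>
    rw [List.length_cons, List.range_succ_eq_map, List.map_cons, List.map_map]
    simpa using ih

-- filtering a duplicate-free list for one value
theorem pv_filter_eq_of_nodup {α : Type} [DecidableEq α] (p : α) :
    ∀ (d : List α), d.Nodup → d.filter (fun t => decide (t = p)) = if p ∈ d then [p] else [] := by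
  intro d
  induction d with
  | nil => simp
  | cons a tl ih =>
    intro hn
    rcases List.nodup_cons.mp hn with ⟨ha, htl⟩
    by_cases hap : a = p
    · subst hap
      have : tl.filter (fun t => decide (t = a)) = [] := by
        apply List.filter_eq_nil_iff.mpr
        intro t ht
        simp only [decide_eq_true_eq]
        exact fun h => ha (h ▸ ht)
      simp [this]
    · simp only [List.filter_cons, decide_eq_true_eq, hap, if_false, ih htl, List.mem_cons]
      by_cases hp : p ∈ tl <;> simp [hp, Ne.symm hap]

-- the bucket fold, in set/update normal form
theorem pv_bfold {α : Type} (k : α → Nat) :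
    ∀ (d : List α) (bks : List (List α)), (∀ t ∈ d, k t < bks.length) →
    d.foldl (fun b t => PySem.List.pySetD b ((k t : Nat) : Int) (PySem.List.pyGetD b ((k t : Nat) : Int) [] ++ [t])) bks
      = (List.range bks.length).map (fun j => bks.getD j [] ++ d.filter (fun t => decide (k t = j))) := by
  intro d
  induction d with
  | nil =>
    intro bks _
    simp only [List.foldl_nil, List.filter_nil, List.append_nil]
    exact (pv_map_getD_range [] bks).symm
  | cons t ds ih =>
    intro bks hb
    have hk : k t < bks.length := hb t (List.mem_cons_self ..)
    have hget : PySem.List.pyGetD bks ((k t : Nat) : Int) ([] : List α) = bks.getD (k t) [] := by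
      simp [PySem.List.pyGetD_natCast]
    have hset : ∀ v, PySem.List.pySetD bks ((k t : Nat) : Int) v = bks.set (k t) v := by
      intro v
      simp [PySem.List.pySetD, PySem.List.pySet?_natCast bks (k t) v hk]
    rw [List.foldl_cons, hget, hset]
    rw [ih _ (by intro x hx; simpa using hb x (List.mem_cons_of_mem _ hx))]
    rw [List.length_set]
    apply List.map_congr_left
    intro j hj
    have hjlt : j < bks.length := List.mem_range.mp hj
    have hset2 : (bks.set (k t) (bks.getD (k t) [] ++ [t])).getD j []
        = if k t = j then bks.getD (k t) [] ++ [t] else bks.getD j [] := by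
      have hj' : j < (bks.set (k t) (bks.getD (k t) [] ++ [t])).length := by
        simpa using hjlt
      rw [List.getD_eq_getElem _ _ hj', List.getElem_set]
      split
      · rfl
      · exact (List.getD_eq_getElem _ _ hjlt).symm
    rw [hset2]
    by_cases hjk : k t = j
    · rw [if_pos hjk, List.filter_cons]
      simp [hjk, List.append_assoc]
    · rw [if_neg hjk, List.filter_cons]
      simp [hjk]

-- pvKey characterization on the priority buckets
theorem pvKey_eq_iff (j : Nat) (hj : j < 24) (t : String) :
    pvKey t = j ↔ t = pvPriority.getD j "" := by
  have hlen : pvPriority.length = 24 := rfl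
  have hjl : j < pvPriority.length := by omega
  rw [List.getD_eq_getElem _ _ hjl]
  constructor
  · intro h
    unfold pvKey at h
    split at h
    · subst h
      have hlt : pvPriority.idxOf t < pvPriority.length := List.idxOf_lt_length_of_mem (by assumption)
      exact (List.getElem_idxOf hlt).symm
    · omega
  · intro h
    subst h
    have hm : pvPriority[j] ∈ pvPriority := List.getElem_mem hjl
    unfold pvKey
    rw [if_pos hm]
    exact pvPriority_nodup.idxOf_getElem j hjl

theorem pvKey_eq_24_iff (t : String) : pvKey t = 24 ↔ t ∉ pvPriority := by
  unfold pvKey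
  split
  · have hlt : pvPriority.idxOf t < pvPriority.length := List.idxOf_lt_length_of_mem (by assumption)
    have : pvPriority.idxOf t < 24 := by simpa [pvPriority] using hlt
    constructor
    · omega
    · intro h; exact absurd (by assumption) h
  · simp_all

-- flattening singleton-or-empty images is filtering
theorem pv_flatten_map_ite {α : Type} [DecidableEq α] (d : List α) :
    ∀ (l : List α), (l.map (fun p => if p ∈ d then [p] else [])).flatten
      = l.filter (fun p => decide (p ∈ d)) := by
  intro l
  induction l with
  | nil => simp
  | cons a tl ih =>
    simp only [List.map_cons, List.flatten_cons, ih, List.filter_cons]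
    by_cases h : a ∈ d <;> simp [h]

-- the pre-truncation list of B
theorem pv_alt_core (tags : List String) :
    ((PySem.List.pyRange 0 ((pvPriority.length : Int) + 1) 1).map (fun _ => ([] : List String))
      |> (PySem.List.dedup tags).foldl
        (fun b t => PySem.List.pySetD b (pvRank.getD t (pvPriority.length : Int))
          (PySem.List.pyGetD b (pvRank.getD t (pvPriority.length : Int)) [] ++ [t]))).flatten
    = pvPriority.filter (fun p => decide (p ∈ PySem.List.dedup tags))
      ++ (PySem.List.dedup tags).filter (fun t => !decide (t ∈ pvPriority)) := by
  have hinit : (PySem.List.pyRange 0 ((pvPriority.length : Int) + 1) 1).map (fun _ => ([] : List String))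
      = List.replicate 25 [] := by rfl
  have hd := PySem.List.nodup_dedup (xs := tags)
  set d := PySem.List.dedup tags with hdd
  rw [hinit]
  have hstep : (fun (b : List (List String)) (t : String) =>
        PySem.List.pySetD b (pvRank.getD t (pvPriority.length : Int))
          (PySem.List.pyGetD b (pvRank.getD t (pvPriority.length : Int)) [] ++ [t]))
      = fun b t => PySem.List.pySetD b ((pvKey t : Nat) : Int)
          (PySem.List.pyGetD b ((pvKey t : Nat) : Int) [] ++ [t]) := by
    funext b t
    rw [pvRank_getD t]
  rw [hstep, pv_bfold pvKey d (List.replicate 25 []) (by intro t _; simpa using pvKey_lt t)]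
  simp only [List.length_replicate]
  have hr : List.range 25 = List.range 24 ++ [24] := List.range_succ
  rw [hr, List.map_append, List.flatten_append]
  congr 1
  · -- priority buckets
    have h1 : (List.range 24).map (fun j => (List.replicate 25 ([] : List String)).getD j [] ++ d.filter (fun t => decide (pvKey t = j)))
        = (List.range 24).map (fun j => if pvPriority.getD j "" ∈ d then [pvPriority.getD j ""] else []) := by
      apply List.map_congr_left
      intro j hj
      have hjlt : j < 24 := List.mem_range.mp hj
      have h25 : j < (List.replicate 25 ([] : List String)).length := by simp; omega
      rw [List.getD_eq_getElem _ _ h25, List.getElem_replicate, List.nil_append]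
      have : d.filter (fun t => decide (pvKey t = j)) = d.filter (fun t => decide (t = pvPriority.getD j "")) := by
        apply List.filter_congr
        intro t _
        simp [pvKey_eq_iff j hjlt t]
      rw [this, pv_filter_eq_of_nodup _ d hd]
    rw [h1]
    have hlen : pvPriority.length = 24 := rfl
    have h2 : (List.range 24).map (fun j => if pvPriority.getD j "" ∈ d then [pvPriority.getD j ""] else [])
        = pvPriority.map (fun p => if p ∈ d then [p] else []) := by
      conv_rhs => rw [← pv_map_getD_range "" pvPriority]
      rw [List.map_map, hlen]
      rfl
    rw [h2, pv_flatten_map_ite]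
  · -- the overflow bucket
    simp only [List.map_cons, List.map_nil, List.flatten_cons, List.flatten_nil, List.append_nil]
    have h25 : (24 : Nat) < (List.replicate 25 ([] : List String)).length := by simp
    rw [List.getD_eq_getElem _ _ h25, List.getElem_replicate, List.nil_append]
    apply List.filter_congr
    intro t _
    by_cases h : t ∈ pvPriority
    · have hne : ¬ pvKey t = 24 := fun hy => ((pvKey_eq_24_iff t).mp hy) h
      simp [h, hne]
    · simp [h, (pvKey_eq_24_iff t).mpr h]

-- the pre-truncation list of A
theorem pv_a_core (tags : List String) :
    tags.foldl (fun acc tag => if tag ∉ acc then acc ++ [tag] else acc)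
      (pvPriority.foldl (fun acc tag => if tag ∈ tags then acc ++ [tag] else acc) [])
    = pvPriority.filter (fun p => decide (p ∈ PySem.List.dedup tags))
      ++ (PySem.List.dedup tags).filter (fun t => !decide (t ∈ pvPriority)) := by
  have h1 : pvPriority.foldl (fun acc tag => if tag ∈ tags then acc ++ [tag] else acc) ([] : List String)
      = pvPriority.filter (fun tag => decide (tag ∈ tags)) := by
    simpa using PySem.List.foldl_append_ite_eq_filter (p := fun tag => tag ∈ tags)
      (l := pvPriority) (acc := ([] : List String))
  rw [h1]
  set pr := pvPriority.filter (fun tag => decide (tag ∈ tags)) with hpr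
  have h2 : (fun (acc : List String) (tag : String) => if tag ∉ acc then acc ++ [tag] else acc)
      = fun acc tag => PySem.Set.add acc tag := by
    funext acc tag
    by_cases h : tag ∈ acc <;> simp [h]
  rw [h2]
  have h3 : tags.foldl (fun acc tag => PySem.Set.add acc tag) pr = PySem.Set.update pr tags := rfl
  rw [h3, PySem.Set.update_eq_append_filter]
  congr 1
  · apply List.filter_congr
    intro p _
    simp
  · rw [PySem.List.dedup_eq_ofList]
    apply List.filter_congr
    intro t ht
    have htt : t ∈ tags := (PySem.Set.mem_ofList tags t).mp ht
    have : (PySem.Set.contains pr t = true) ↔ t ∈ pvPriority := by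
      rw [PySem.Set.contains_iff, hpr]
      simp [List.mem_filter, htt]
    by_cases h : t ∈ pvPriority
    · simp [h]
      exact List.mem_filter.mpr ⟨h, by simp [htt]⟩
    · simp [h]
      exact fun hmem => h (List.mem_filter.mp hmem).1

-- ===== VERDICT (by name: the statement is the Claim_ definition above) =====
theorem prioritize_tags_spec : Claim_equal_prioritize_tags := by
  intro tags max_tags _
  unfold Spec_prioritize_tags prioritize_tags prioritize_tags_alt
  simp only []
  rw [pv_a_core tags, ← pv_alt_core tags]
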